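-- pv_equiv track=rewrite | github.com/pedramaghazadeh/CSE258-Web-Mining-and-Recommender-Systems | HW3/homework3.py | improvedStrategy
-- ===== SOURCE A (Python) =====
-- def improvedStrategy(mostPopular, totalRead):
--     # Same as above function, just find an item set that'll have higher accuracy
--     return1 = set()
--     count = 0
--     for ic, i in mostPopular:
--         count += ic
--         return1.add(i)
--         if count > totalRead * 0.6: break
--     return return1
-- ===== SOURCE B (Python) =====
-- def improvedStrategy(mostPopular, totalRead):
--     # Different decomposition: build the prefix-sum list of counts, locate the
--     # cutoff (first prefix strictly above totalRead*0.6, inclusive), then build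
--     # the set from the slice up to the cutoff in one comprehension.
--     prefix = []
--     s = 0
--     for ic, _ in mostPopular:
--         s += ic
--         prefix.append(s)
--     threshold = totalRead * 0.6
--     cutoff = next((i + 1 for i, c in enumerate(prefix) if c > threshold), len(prefix))
--     return {item for _, item in mostPopular[:cutoff]}
-- ===== Notes on version B (the rewrite author's own statement) =====
-- stated objective: alternative
-- what changed: Replaces A's single break-on-threshold loop that mutates a set with a three-stage decomposition: build the prefix-sum list, find the cutoff index (first prefix strictly above totalRead*0.6, inclusive, defaulting to the whole list), and build the set from the slice in one comprehension.
import Mathlib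
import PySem

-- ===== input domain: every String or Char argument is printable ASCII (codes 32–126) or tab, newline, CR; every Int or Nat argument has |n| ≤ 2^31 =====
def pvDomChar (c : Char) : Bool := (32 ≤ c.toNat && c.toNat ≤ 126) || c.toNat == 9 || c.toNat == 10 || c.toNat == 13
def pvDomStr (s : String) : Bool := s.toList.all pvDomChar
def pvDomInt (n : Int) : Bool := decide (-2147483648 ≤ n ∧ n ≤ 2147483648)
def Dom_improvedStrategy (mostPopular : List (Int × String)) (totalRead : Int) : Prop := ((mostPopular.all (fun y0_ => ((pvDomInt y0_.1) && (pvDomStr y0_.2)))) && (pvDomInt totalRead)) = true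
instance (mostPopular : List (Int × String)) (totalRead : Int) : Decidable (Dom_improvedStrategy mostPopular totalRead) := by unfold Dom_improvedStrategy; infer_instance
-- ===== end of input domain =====

-- B replaces A's single pass with break by prefixSums sums + a cutoff index + one
-- slice-to-set comprehension (different decomposition, same cost; not faster).

-- Shared primitive, used by both ports: Python's `count > totalRead * 0.6`.
-- It is EXACT: 0.6 is the IEEE-754 double 5404319552844595/2^53; `totalRead * 0.6`
-- rounds the product to the nearest double (ties to even), modelled below with
-- integer arithmetic; Python's int-vs-float comparison is itself exact.
def pyGtPoint6 (c t : Int) : Bool :=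
  let x : Int := t * 5404319552844595
  if x = 0 then c > 0
  else
    let a : Nat := x.natAbs
    let k : Nat := Nat.log2 a + 1           -- bit length of a (a > 0)
    if k ≤ 53 then c * 2 ^ 53 > x           -- product representable exactly
    else
      let sh : Nat := k - 53
      let q : Nat := a / 2 ^ sh
      let r : Nat := a % 2 ^ sh
      let q' : Nat := if r * 2 > 2 ^ sh ∨ (r * 2 = 2 ^ sh ∧ q % 2 = 1) then q + 1 else q
      let fnum : Int := (if x < 0 then -(q' : Int) else (q' : Int)) * 2 ^ sh
      c * 2 ^ 53 > fnum

-- ===== PORT A =====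
-- A's loop with `break`: structural recursion carrying the set and the running count.
def improvedStrategyGo (t : Int) : List (Int × String) → List String → Int → List String
  | [], return1, _ => return1
  | (ic, i) :: rest, return1, count =>
      let count' := count + ic
      let return1' := PySem.Set.add return1 i
      if pyGtPoint6 count' t then return1' else improvedStrategyGo t rest return1' count'

def improvedStrategy (mostPopular : List (Int × String)) (totalRead : Int) : List String :=
  improvedStrategyGo totalRead mostPopular PySem.Set.empty 0

-- ===== PORT B =====
def improvedStrategy_alt (mostPopular : List (Int × String)) (totalRead : Int) : List String :=
  let prefixSums := (mostPopular.foldl (fun acc p => (acc.1 ++ [acc.2 + p.1], acc.2 + p.1))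
                  (([] : List Int), (0 : Int))).1
  let cutoff := match prefixSums.findIdx? (fun c => pyGtPoint6 c totalRead) with
    | some i => i + 1
    | none => prefixSums.length
  PySem.Set.ofList ((mostPopular.take cutoff).map Prod.snd)

-- ===== PRECONDITION & SPEC =====
def Spec_improvedStrategy (mostPopular : List (Int × String)) (totalRead : Int) (out : List String) : Prop := out = improvedStrategy_alt mostPopular totalRead
instance (mostPopular : List (Int × String)) (totalRead : Int) (out : List String) : Decidable (Spec_improvedStrategy mostPopular totalRead out) := by unfold Spec_improvedStrategy; infer_instance

-- ===== CLAIM (what is proved, stated in full; the proofs are below) =====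
def Claim_equal_improvedStrategy : Prop := ∀ (mostPopular : List (Int × String)) (totalRead : Int), Dom_improvedStrategy mostPopular totalRead → Spec_improvedStrategy mostPopular totalRead (improvedStrategy mostPopular totalRead)

-- ===== LEMMAS AND PROOFS =====

-- How many items A consumes when starting from running count c.
def cutFrom (t c : Int) : List (Int × String) → Nat
  | [] => 0
  | (ic, _) :: rest => if pyGtPoint6 (c + ic) t then 1 else 1 + cutFrom t (c + ic) rest

-- The prefixSums sums from running count c.
def sumsFrom (c : Int) : List (Int × String) → List Int
  | [] => []
  | (ic, _) :: rest => (c + ic) :: sumsFrom (c + ic) rest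

theorem go_eq_take (t : Int) : ∀ (l : List (Int × String)) (s : List String) (c : Int),
    improvedStrategyGo t l s c =
      List.foldl PySem.Set.add s ((l.take (cutFrom t c l)).map Prod.snd) := by
  intro l
  induction l with
  | nil => intro s c; simp [improvedStrategyGo, cutFrom]
  | cons p rest ih =>
      intro s c
      obtain ⟨ic, i⟩ := p
      simp only [improvedStrategyGo, cutFrom]
      by_cases h : pyGtPoint6 (c + ic) t
      · simp [h]
      · simp only [h, ih]
        simp [Nat.add_comm 1 (cutFrom t (c + ic) rest), List.take_succ_cons]

theorem fold_prefix_eq (l : List (Int × String)) : ∀ (acc : List Int) (c : Int),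
    (l.foldl (fun acc p => (acc.1 ++ [acc.2 + p.1], acc.2 + p.1)) (acc, c)).1 =
      acc ++ sumsFrom c l := by
  induction l with
  | nil => intro acc c; simp [sumsFrom]
  | cons p rest ih =>
      intro acc c
      simp only [List.foldl_cons, ih, sumsFrom]
      simp

theorem findIdx?_sumsFrom (t : Int) : ∀ (l : List (Int × String)) (c : Int),
    (match (sumsFrom c l).findIdx? (fun x => pyGtPoint6 x t) with
      | some i => i + 1
      | none => (sumsFrom c l).length) = cutFrom t c l := by
  intro l
  induction l with
  | nil => intro c; simp [sumsFrom, cutFrom]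
  | cons p rest ih =>
      intro c
      obtain ⟨ic, i⟩ := p
      simp only [sumsFrom, cutFrom, List.findIdx?_cons]
      by_cases h : pyGtPoint6 (c + ic) t
      · simp [h]
      · simp only [h]
        rw [← ih (c + ic)]
        cases hf : (sumsFrom (c + ic) rest).findIdx? (fun x => pyGtPoint6 x t) <;>
          simp [List.length_cons, Nat.add_comm]

theorem improvedStrategy_spec : Claim_equal_improvedStrategy := by
  unfold Claim_equal_improvedStrategy
  intro mp t _
  unfold Spec_improvedStrategy improvedStrategy improvedStrategy_alt
  rw [go_eq_take, fold_prefix_eq, List.nil_append]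
  simp only []
  rw [findIdx?_sumsFrom, PySem.Set.ofList_eq_foldl]
  rfl
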